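-- pv_equiv track=rewrite | github.com/chouaibKr0/complexity-project | src/verifiers/subset_sum_verifier.py | verify_subset_sum_solution
-- ===== SOURCE A (Python) =====
-- def verify_subset_sum_solution(numbers: list[int], target: int, subset: list[int]) -> bool:
--     """
--     Verify that a subset sums to the target.
--
--     This is the polynomial-time certificate verifier for Subset Sum.
--
--     Args:
--         numbers: Original set of numbers.
--         target: Target sum.
--         subset: Proposed subset that should sum to target.
--
--     Returns:
--         True if subset is valid and sums to target.
--
--     Complexity: O(n) - polynomial time
--
--     """
--
--     # Guard against invalid subset
--     if subset is None:
--         return False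
--
--     # Build a frequency map of the original numbers
--     counts = {}
--     for x in numbers:
--         counts[x] = counts.get(x, 0) + 1
--
--     # Verify all elements of subset come from numbers
--     total = 0
--     for x in subset:
--         if x not in counts or counts[x] == 0:
--             return False
--         counts[x] -= 1
--         total += x
--
--     # Verify sum equals target
--     return total == target
-- ===== SOURCE B (Python) =====
-- def verify_subset_sum_solution(numbers: list[int], target: int, subset: list[int]) -> bool:
--     # Guard against invalid subset
--     if subset is None:
--         return False
--     # Sum check first, as its own pass
--     if sum(subset) != target:
--         return False
--     # Frequency tables, compared table against table (multiset containment)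
--     nc = {}
--     for x in numbers:
--         nc[x] = nc.get(x, 0) + 1
--     sc = {}
--     for x in subset:
--         sc[x] = sc.get(x, 0) + 1
--     return all(nc.get(x, 0) >= c for x, c in sc.items())
-- ===== Notes on version B (the rewrite author's own statement) =====
-- stated objective: idiomatic
-- what changed: Replaces A's single interleaved loop that decrements counts while accumulating a running total with a standalone sum() check followed by building two frequency tables and a table-vs-table multiset-containment comparison.
import Mathlib
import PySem

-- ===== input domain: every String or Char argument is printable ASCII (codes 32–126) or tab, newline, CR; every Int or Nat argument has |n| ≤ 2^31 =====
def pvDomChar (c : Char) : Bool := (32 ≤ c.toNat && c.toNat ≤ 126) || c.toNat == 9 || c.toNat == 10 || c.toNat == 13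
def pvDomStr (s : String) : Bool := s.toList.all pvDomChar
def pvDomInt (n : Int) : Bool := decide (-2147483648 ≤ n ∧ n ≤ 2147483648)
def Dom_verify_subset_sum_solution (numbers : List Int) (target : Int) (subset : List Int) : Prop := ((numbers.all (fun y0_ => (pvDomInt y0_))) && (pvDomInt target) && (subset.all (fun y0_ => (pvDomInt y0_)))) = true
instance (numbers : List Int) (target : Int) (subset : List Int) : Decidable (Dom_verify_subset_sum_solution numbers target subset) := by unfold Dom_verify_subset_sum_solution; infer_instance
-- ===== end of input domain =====

-- B splits A's single decrement-and-accumulate loop into a separate sum check plus a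
-- two-frequency-table multiset-containment comparison (idiomatic decomposition, same cost).


-- ===== PORT A =====
-- A's verification loop: 'for x in subset: if x not in counts or counts[x] == 0: return False;
-- counts[x] -= 1; total += x', then 'return total == target'.
def pvALoop (target : Int) : PySem.Dict Int Int → Int → List Int → Bool
  | _, total, [] => total == target
  | d, total, x :: xs =>
      if !(d.contains x) || (d.getD x 0 == 0) then false
      else pvALoop target (d.modify x 0 (· - 1)) (total + x) xs

def verify_subset_sum_solution (numbers : List Int) (target : Int) (subset : List Int) : Bool :=
  -- counts[x] = counts.get(x, 0) + 1
  let counts := numbers.foldl (fun d x => d.insert x (d.getD x 0 + 1)) PySem.Dict.empty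
  pvALoop target counts 0 subset

-- ===== PORT B =====
def verify_subset_sum_solution_alt (numbers : List Int) (target : Int) (subset : List Int) : Bool :=
  if subset.sum != target then false
  else
    let nc : PySem.Dict Int Int := numbers.foldl (fun d x => d.insert x (d.getD x 0 + 1)) PySem.Dict.empty
    let sc : PySem.Dict Int Int := subset.foldl (fun d x => d.insert x (d.getD x 0 + 1)) PySem.Dict.empty
    sc.items.all (fun p => decide (nc.getD p.1 0 ≥ p.2))

-- ===== PRECONDITION & SPEC =====
def Spec_verify_subset_sum_solution (numbers : List Int) (target : Int) (subset : List Int) (out : Bool) : Prop := out = verify_subset_sum_solution_alt numbers target subset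
instance (numbers : List Int) (target : Int) (subset : List Int) (out : Bool) : Decidable (Spec_verify_subset_sum_solution numbers target subset out) := by unfold Spec_verify_subset_sum_solution; infer_instance

-- ===== CLAIM (what is proved, stated in full; the proofs are below) =====
def Claim_equal_verify_subset_sum_solution : Prop := ∀ (numbers : List Int) (target : Int) (subset : List Int), Dom_verify_subset_sum_solution numbers target subset → Spec_verify_subset_sum_solution numbers target subset (verify_subset_sum_solution numbers target subset)

-- ===== LEMMAS AND PROOFS =====

-- A's loop succeeds iff the remaining subset is contained (as a multiset) in the remaining
-- counts and the final total hits the target.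
lemma pvALoop_iff (target : Int) (xs : List Int) : ∀ (d : PySem.Dict Int Int) (total : Int),
    (∀ y, 0 ≤ d.getD y 0) →
    (pvALoop target d total xs = true ↔
      (∀ y, (xs.count y : Int) ≤ d.getD y 0) ∧ total + xs.sum = target) := by
  induction xs with
  | nil =>
      intro d total hnn
      constructor
      · intro h
        refine ⟨fun y => by simpa using hnn y, ?_⟩
        simpa [pvALoop] using h
      · rintro ⟨-, h⟩
        simpa [pvALoop] using h
  | cons x xs ih =>
      intro d total hnn
      have hcond : (!(d.contains x) || (d.getD x 0 == 0)) = (d.getD x 0 == 0) := by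
        cases hc : d.contains x with
        | true => simp
        | false => simp [PySem.Dict.getD_of_not_contains _ _ hc]
      rw [pvALoop, hcond]
      by_cases h0 : d.getD x 0 = 0
      · rw [if_pos (by simp [h0])]
        constructor
        · intro h; cases h
        · rintro ⟨hcnt, -⟩
          exfalso
          have := hcnt x
          rw [List.count_cons] at this
          simp [h0] at this
          omega
      · rw [if_neg (by simpa using h0)]
        have hnn' : ∀ y, 0 ≤ (d.modify x 0 (· - 1)).getD y 0 := by
          intro y
          rw [PySem.Dict.getD_modify]
          split_ifs with hy
          · have h1 := hnn x; omega
          · exact hnn y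
        rw [ih (d.modify x 0 (· - 1)) (total + x) hnn']
        constructor
        · rintro ⟨hcnt, hsum⟩
          refine ⟨?_, by rw [List.sum_cons]; omega⟩
          intro y
          have hy := hcnt y
          rw [PySem.Dict.getD_modify] at hy
          rw [List.count_cons]
          by_cases hxy : y = x
          · subst hxy
            simp at hy ⊢
            omega
          · rw [if_neg hxy] at hy
            have hb : (x == y) = false := by simp [Ne.symm hxy]
            simpa [hb] using hy
        · rintro ⟨hcnt, hsum⟩
          refine ⟨?_, by rw [List.sum_cons] at hsum; omega⟩
          intro y
          have hy := hcnt y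
          rw [List.count_cons] at hy
          rw [PySem.Dict.getD_modify]
          by_cases hxy : y = x
          · subst hxy
            simp at hy ⊢
            omega
          · have hxy' : (x == y) = false := by simp [Ne.symm hxy]
            rw [if_neg hxy]
            simpa [hxy'] using hy

-- B succeeds iff the sum matches and the subset is multiset-contained in numbers.
lemma alt_iff (numbers : List Int) (target : Int) (subset : List Int) :
    verify_subset_sum_solution_alt numbers target subset = true ↔
      (∀ y, (subset.count y : Int) ≤ numbers.count y) ∧ subset.sum = target := by
  simp only [verify_subset_sum_solution_alt]
  by_cases hs : subset.sum = target
  · simp only [hs, bne_self_eq_false, Bool.false_eq_true, if_false,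
      PySem.Dict.foldl_insert_getD_add_one_eq_counter, PySem.Dict.items_counter,
      List.all_map, List.all_eq_true, PySem.Dict.getD_counter, decide_eq_true_eq,
      Function.comp, ge_iff_le]
    constructor
    · intro h
      refine ⟨?_, trivial⟩
      intro y
      by_cases hy : y ∈ subset
      · exact h y (by simpa [PySem.Set.mem_ofList] using hy)
      · rw [List.count_eq_zero_of_not_mem hy]
        exact_mod_cast Int.natCast_nonneg (numbers.count y)
    · rintro ⟨h, -⟩
      exact fun y _ => h y
  · have hb : (subset.sum != target) = true := by simpa using hs
    simp [hb, hs]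

-- ===== VERDICT (by name: the statement is the Claim_ definition above) =====
theorem verify_subset_sum_solution_spec : Claim_equal_verify_subset_sum_solution := by
  intro numbers target subset _
  unfold Spec_verify_subset_sum_solution
  unfold verify_subset_sum_solution
  rw [PySem.Dict.foldl_insert_getD_add_one_eq_counter]
  have hnn : ∀ y, 0 ≤ (PySem.Dict.counter numbers).getD y 0 := by
    intro y
    rw [PySem.Dict.getD_counter]
    exact_mod_cast Int.natCast_nonneg (numbers.count y)
  cases hA : pvALoop target (PySem.Dict.counter numbers) 0 subset with
  | false =>
      cases hB : verify_subset_sum_solution_alt numbers target subset with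
      | false => rfl
      | true =>
          exfalso
          rw [alt_iff] at hB
          have := (pvALoop_iff target subset (PySem.Dict.counter numbers) 0 hnn).mpr
            ⟨fun y => by rw [PySem.Dict.getD_counter]; exact hB.1 y, by simpa using hB.2⟩
          rw [hA] at this
          exact Bool.false_ne_true this
  | true =>
      have h := (pvALoop_iff target subset (PySem.Dict.counter numbers) 0 hnn).mp hA
      symm
      rw [alt_iff]
      exact ⟨fun y => by have hy := h.1 y; rwa [PySem.Dict.getD_counter] at hy, by have := h.2; omega⟩
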